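-- pv_equiv track=rewrite | github.com/Kontari/MapGen | MakeMap.py | fill_land
-- ===== SOURCE A (Python) =====
-- def fill_land(grid, land=9, sea=1, cutoff=6, rounds=1):
--     '''
--     Fill in ocean surrounded by land
--     '''
--     added_land = False
--
--     for y in range(1, len(grid) - 1):
--         for x in range(1, len(grid[0]) - 1):
--
--             if grid[x][y] is sea:
--                 n = 0
--                 if grid[x-1][y-1] == land : n += 1
--                 if grid[x-1][y]   == land : n += 1
--                 if grid[x-1][y+1] == land : n += 1
--                 if grid[x][y-1]   == land : n += 1
--                 if grid[x][y+1]   == land : n += 1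
--                 if grid[x+1][y-1] == land : n += 1
--                 if grid[x+1][y]   == land : n += 1
--                 if grid[x+1][y+1] == land : n += 1
--
--                 if n > cutoff:
--                     grid[x][y] = land
--                     added_land = True
--
--
--     if (rounds > 0) and (added_land == True):
--         fill_land(grid=grid, land=land, sea=sea,
--                       cutoff=cutoff, rounds=(rounds - 1))
--
--     return grid
-- ===== SOURCE B (Python) =====
-- # Iterative (do-while) version: one scan per round, neighbor count via a sum
-- # over an offset table instead of eight if-statements. Mutates grid in place
-- # like the original.
--
-- _N8 = ((-1, -1), (-1, 0), (-1, 1), (0, -1), (0, 1), (1, -1), (1, 0), (1, 1))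
--
--
-- def fill_land(grid, land=9, sea=1, cutoff=6, rounds=1):
--     '''
--     Fill in ocean surrounded by land
--     '''
--     while True:
--         added_land = False
--         for y in range(1, len(grid) - 1):
--             for x in range(1, len(grid[0]) - 1):
--                 if grid[x][y] == sea:
--                     n = sum(grid[x + dx][y + dy] == land for dx, dy in _N8)
--                     if n > cutoff:
--                         grid[x][y] = land
--                         added_land = True
--         if rounds > 0 and added_land:
--             rounds -= 1
--         else:
--             return grid
-- ===== Notes on version B (the rewrite author's own statement) =====
-- stated objective: idiomatic
-- what changed: The recursive round handling becomes an explicit do-while loop (scan once, then continue while rounds > 0 and land was added), and the eight if-statement neighbor count becomes a sum over an offset table; an identity test 'is sea' becomes the value test '== sea'.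
-- outside the precondition, e.g. on fill_land([[1, 1, 1], [1, 1, 1], [1, 1]], 9, 1, 6, 1): A raises IndexError, B raises IndexError
import Mathlib
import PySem

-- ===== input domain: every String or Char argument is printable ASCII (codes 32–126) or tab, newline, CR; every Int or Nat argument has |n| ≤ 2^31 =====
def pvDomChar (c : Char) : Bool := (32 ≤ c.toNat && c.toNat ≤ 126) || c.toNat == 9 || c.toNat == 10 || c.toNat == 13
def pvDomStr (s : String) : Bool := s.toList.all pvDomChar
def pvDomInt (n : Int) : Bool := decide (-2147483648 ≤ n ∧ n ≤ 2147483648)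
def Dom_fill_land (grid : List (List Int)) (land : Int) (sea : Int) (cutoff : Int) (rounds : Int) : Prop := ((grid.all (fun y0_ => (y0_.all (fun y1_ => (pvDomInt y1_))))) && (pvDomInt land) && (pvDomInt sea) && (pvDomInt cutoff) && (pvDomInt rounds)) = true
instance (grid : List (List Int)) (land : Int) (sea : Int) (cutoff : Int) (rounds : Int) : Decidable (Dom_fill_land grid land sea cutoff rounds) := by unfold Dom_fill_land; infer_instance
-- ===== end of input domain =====

-- B replaces A's recursion over rounds by an explicit do-while loop and the eight
-- neighbor if-statements by a sum over an offset table (same cost, idiomatic).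
-- Both Pythons mutate `grid` in place; the equivalence proved here is about the
-- returned value (B performs the same in-place mutation).


-- 2D access grid[x][y] / grid[x][y] = v (shared trivial accessors; in range under Pre_)
def pvGet2 (g : List (List Int)) (x y : Int) : Int :=
  PySem.List.pyGetD (PySem.List.pyGetD g x []) y 0
def pvSet2 (g : List (List Int)) (x y : Int) (v : Int) : List (List Int) :=
  PySem.List.pySetD g x (PySem.List.pySetD (PySem.List.pyGetD g x []) y v)

-- ===== PORT A =====
-- one scan of A's nested for-loops; state = (grid, added_land); 'is sea' is ported
-- as '= sea' (Pre_ keeps exactly the inputs where CPython identity and equality agree)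
def fillPassA (grid : List (List Int)) (land sea cutoff : Int) : List (List Int) × Bool :=
  (PySem.List.pyRange 1 ((grid.length : Int) - 1) 1).foldl (fun st y =>
    (PySem.List.pyRange 1 (((PySem.List.pyGetD st.1 0 []).length : Int) - 1) 1).foldl (fun st x =>
      if pvGet2 st.1 x y = sea then
        let n : Int := 0
        let n := if pvGet2 st.1 (x-1) (y-1) = land then n + 1 else n
        let n := if pvGet2 st.1 (x-1) y     = land then n + 1 else n
        let n := if pvGet2 st.1 (x-1) (y+1) = land then n + 1 else n
        let n := if pvGet2 st.1 x     (y-1) = land then n + 1 else n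
        let n := if pvGet2 st.1 x     (y+1) = land then n + 1 else n
        let n := if pvGet2 st.1 (x+1) (y-1) = land then n + 1 else n
        let n := if pvGet2 st.1 (x+1) y     = land then n + 1 else n
        let n := if pvGet2 st.1 (x+1) (y+1) = land then n + 1 else n
        if n > cutoff then (pvSet2 st.1 x y land, true) else st
      else st) st) (grid, false)

def fill_land (grid : List (List Int)) (land : Int) (sea : Int) (cutoff : Int) (rounds : Int) : List (List Int) :=
  let p := fillPassA grid land sea cutoff
  if h : rounds > 0 ∧ p.2 = true then
    fill_land p.1 land sea cutoff (rounds - 1)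
  else
    p.1
termination_by rounds.toNat
decreasing_by omega

-- ===== PORT B =====
def pvN8 : List (Int × Int) := [(-1,-1),(-1,0),(-1,1),(0,-1),(0,1),(1,-1),(1,0),(1,1)]

-- one scan of B's loops: neighbor count = sum over the offset table pvN8
def fillPassB (grid : List (List Int)) (land sea cutoff : Int) : List (List Int) × Bool :=
  (PySem.List.pyRange 1 ((grid.length : Int) - 1) 1).foldl (fun st y =>
    (PySem.List.pyRange 1 (((PySem.List.pyGetD st.1 0 []).length : Int) - 1) 1).foldl (fun st x =>
      if pvGet2 st.1 x y = sea then
        let n : Int := pvN8.foldl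
          (fun acc d => acc + (if pvGet2 st.1 (x + d.1) (y + d.2) = land then 1 else 0)) 0
        if n > cutoff then (pvSet2 st.1 x y land, true) else st
      else st) st) (grid, false)

-- B's 'while True: scan; continue while rounds > 0 and added_land'
def fill_land_alt (grid : List (List Int)) (land : Int) (sea : Int) (cutoff : Int) (rounds : Int) : List (List Int) :=
  let p := fillPassB grid land sea cutoff
  if h : rounds > 0 ∧ p.2 = true then
    fill_land_alt p.1 land sea cutoff (rounds - 1)
  else
    p.1
termination_by rounds.toNat
decreasing_by omega

-- ===== PRECONDITION & SPEC =====
-- Pre_ excludes (a) grids whose row lengths can send A's unchecked neighbor indexing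
-- out of range (A raises IndexError on most of them; on the rest, where no cell passes
-- the sea test, it returns the grid unchanged), and (b) inputs where 'grid[x][y] is sea'
-- is implementation-defined because sea lies outside CPython's small-int cache while some
-- cell equals sea — there identity and equality can disagree and A's value is accidental.
def Pre_fill_land (grid : List (List Int)) (land : Int) (sea : Int) (cutoff : Int) (rounds : Int) : Prop :=
  (grid.length ≤ 2 ∨ (grid.headD []).length ≤ 2 ∨
    ((grid.headD []).length ≤ grid.length ∧
      ∀ row ∈ grid.take (grid.headD []).length, grid.length ≤ row.length)) ∧
  ((-5 ≤ sea ∧ sea ≤ 256) ∨ ∀ row ∈ grid, ∀ v ∈ row, v ≠ sea)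
instance (grid : List (List Int)) (land : Int) (sea : Int) (cutoff : Int) (rounds : Int) : Decidable (Pre_fill_land grid land sea cutoff rounds) := by unfold Pre_fill_land; infer_instance

def pvWitness_fill_land : List (List Int) × Int × Int × Int × Int :=
  ([[9,9,9],[9,1,9],[9,9,9]], 9, 1, 6, 1)

def Spec_fill_land (grid : List (List Int)) (land : Int) (sea : Int) (cutoff : Int) (rounds : Int) (out : List (List Int)) : Prop := out = fill_land_alt grid land sea cutoff rounds
instance (grid : List (List Int)) (land : Int) (sea : Int) (cutoff : Int) (rounds : Int) (out : List (List Int)) : Decidable (Spec_fill_land grid land sea cutoff rounds out) := by unfold Spec_fill_land; infer_instance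

-- ===== CLAIM (what is proved, stated in full; the proofs are below) =====
def Claim_equal_fill_land : Prop := ∀ (grid : List (List Int)) (land : Int) (sea : Int) (cutoff : Int) (rounds : Int), Dom_fill_land grid land sea cutoff rounds → Pre_fill_land grid land sea cutoff rounds → Spec_fill_land grid land sea cutoff rounds (fill_land grid land sea cutoff rounds)

-- ===== LEMMAS AND PROOFS =====

theorem ite_succ_eq_add_ite (c : Prop) [Decidable c] (n : Int) :
    (if c then n + 1 else n) = n + (if c then 1 else 0) := by
  split_ifs <;> ring

-- the two scans agree (the neighbor counts are the same sum, in the same order)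
theorem pass_eq (grid : List (List Int)) (land sea cutoff : Int) :
    fillPassA grid land sea cutoff = fillPassB grid land sea cutoff := by
  unfold fillPassA fillPassB
  congr 1
  funext st y
  congr 1
  funext st x
  by_cases hsea : pvGet2 st.1 x y = sea
  · simp only [hsea, pvN8, List.foldl_cons, List.foldl_nil,
      ite_succ_eq_add_ite, sub_eq_add_neg, add_zero]
  · simp only [if_neg hsea]

theorem body_eq (grid : List (List Int)) (land sea cutoff rounds : Int) :
    ∀ (n : Nat), rounds.toNat ≤ n →
      fill_land grid land sea cutoff rounds = fill_land_alt grid land sea cutoff rounds := by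
  intro n
  induction n generalizing grid rounds with
  | zero =>
    intro h
    rw [fill_land, fill_land_alt, pass_eq]
    have hr : ¬ rounds > 0 := by omega
    rw [dif_neg (by simp [hr]), dif_neg (by simp [hr])]
  | succ m ih =>
    intro h
    rw [fill_land, fill_land_alt, pass_eq]
    by_cases hc : rounds > 0 ∧ (fillPassB grid land sea cutoff).2 = true
    · rw [dif_pos hc, dif_pos hc]
      exact ih _ _ (by omega)
    · rw [dif_neg hc, dif_neg hc]

-- ===== VERDICT (by name: the statement is the Claim_ definition above) =====
theorem fill_land_spec : Claim_equal_fill_land := by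
  intro grid land sea cutoff rounds _ _
  unfold Spec_fill_land
  exact body_eq grid land sea cutoff rounds rounds.toNat le_rfl
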